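-- pv_equiv track=rewrite | github.com/vaishke/Computational-Thinking | Project_Euler/PE_48.py | last_ten_digits
-- ===== SOURCE A (Python) =====
-- def last_ten_digits(num: int) -> str:
--     digits = str()
--     iter  = 1
--     while iter <= 10:
--         digits += str(num % 10)
--         num //= 10
--         iter += 1
--     return digits[::-1]
-- ===== SOURCE B (Python) =====
-- def last_ten_digits(num: int) -> str:
--     return str(num % 10**10).zfill(10)
-- ===== Notes on version B (the rewrite author's own statement) =====
-- stated objective: idiomatic
-- what changed: Replaces the ten-iteration digit-extraction loop (repeated modulo-ten and floor-division steps plus a final string reversal) with a closed form: a single modulo by ten-to-the-tenth keeps the last ten digits (matching the loop's floor semantics on negatives) and str(...).zfill of width ten zero-pads the result.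
import Mathlib
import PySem

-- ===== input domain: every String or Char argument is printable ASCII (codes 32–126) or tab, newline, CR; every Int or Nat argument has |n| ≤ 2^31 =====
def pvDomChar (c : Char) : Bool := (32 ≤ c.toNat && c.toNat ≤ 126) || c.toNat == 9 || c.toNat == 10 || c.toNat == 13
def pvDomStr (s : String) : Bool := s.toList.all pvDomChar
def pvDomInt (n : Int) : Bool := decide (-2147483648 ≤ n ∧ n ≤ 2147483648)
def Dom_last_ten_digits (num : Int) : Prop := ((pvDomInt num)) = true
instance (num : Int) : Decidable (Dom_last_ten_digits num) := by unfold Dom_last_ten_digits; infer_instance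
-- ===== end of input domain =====

-- B replaces A's ten-step digit-extraction loop by the closed form: modulo ten-to-the-tenth, then zfill to width ten (more idiomatic, same cost).


-- ===== PORT A =====
-- while iter <= 10: digits += str(num % 10); num //= 10; iter += 1   — a fold over the 10 counter values
def last_ten_digits (num : Int) : String :=
  let st := (PySem.List.pyRange 1 11 1).foldl
    (fun (st : String × Int) _ =>
      (st.1 ++ PySem.Int.toStr (PySem.Int.mod st.2 10), PySem.Int.floordiv st.2 10))
    ("", num)
  -- digits[::-1]
  ((PySem.Str.slice? st.1 none none (-1)).getD "")

-- ===== PORT B =====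
def last_ten_digits_alt (num : Int) : String :=
  PySem.Str.zfill (PySem.Int.toStr (PySem.Int.mod num (10 ^ 10))) 10

-- ===== PRECONDITION & SPEC =====
def Spec_last_ten_digits (num : Int) (out : String) : Prop := out = last_ten_digits_alt num
instance (num : Int) (out : String) : Decidable (Spec_last_ten_digits num out) := by unfold Spec_last_ten_digits; infer_instance

-- ===== CLAIM (what is proved, stated in full; the proofs are below) =====
def Claim_equal_last_ten_digits : Prop := ∀ (num : Int), Dom_last_ten_digits num → Spec_last_ten_digits num (last_ten_digits num)

-- ===== LEMMAS AND PROOFS =====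

-- digits of x, most significant first, k of them (the reverse of what A's loop accumulates)
def pvMsb : Nat → Int → List Char
  | 0, _ => []
  | k+1, x => pvMsb k (PySem.Int.floordiv x 10) ++ [Nat.digitChar (PySem.Int.mod x 10).toNat]

-- decimal digits of a natural number, most significant first (= Nat.toDigits 10)
def pvDigs (n : Nat) : List Char :=
  if n < 10 then [Nat.digitChar n]
  else pvDigs (n / 10) ++ [Nat.digitChar (n % 10)]
  termination_by n
  decreasing_by exact Nat.div_lt_self (by omega) (by omega)

lemma pv_toStr_single (x : Int) :
    PySem.Int.toStr (PySem.Int.mod x 10) =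
      String.ofList [Nat.digitChar (PySem.Int.mod x 10).toNat] := by
  have h0 : 0 ≤ PySem.Int.mod x 10 := PySem.Int.mod_nonneg x (by norm_num : (0:Int) < 10)
  have h1 : PySem.Int.mod x 10 < 10 := PySem.Int.mod_lt x (by norm_num : (0:Int) < 10)
  set r := PySem.Int.mod x 10 with hr
  interval_cases r <;> decide

lemma pv_ofList_append (u v : List Char) :
    String.ofList u ++ String.ofList v = String.ofList (u ++ v) := by
  apply String.toList_injective
  simp

lemma pv_foldl_loop (l : List Int) (s : List Char) (x : Int) :
    (l.foldl
      (fun (st : String × Int) _ =>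
        (st.1 ++ PySem.Int.toStr (PySem.Int.mod st.2 10), PySem.Int.floordiv st.2 10))
      (String.ofList s, x)).1
    = String.ofList (s ++ (pvMsb l.length x).reverse) := by
  induction l generalizing s x with
  | nil => simp [pvMsb]
  | cons a t ih =>
    simp only [List.foldl_cons, List.length_cons]
    have hstep : String.ofList s ++ PySem.Int.toStr (PySem.Int.mod x 10)
        = String.ofList (s ++ [Nat.digitChar (PySem.Int.mod x 10).toNat]) := by
      rw [pv_toStr_single, pv_ofList_append]
    rw [hstep, ih]
    simp [pvMsb]

lemma pv_msb_length (k : Nat) (x : Int) : (pvMsb k x).length = k := by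
  induction k generalizing x with
  | zero => rfl
  | succ k ih => simp [pvMsb, ih]

lemma pv_msb_zero (k : Nat) : pvMsb k 0 = List.replicate k '0' := by
  induction k with
  | zero => rfl
  | succ k ih =>
    rw [pvMsb, (by decide : PySem.Int.floordiv 0 10 = (0:Int)),
        (by decide : PySem.Int.mod 0 10 = (0:Int)), ih]
    have h0 : (Int.toNat 0).digitChar = '0' := by decide
    rw [h0, ← List.replicate_succ']

-- x and its remainder mod 10^k have the same low k digits
lemma pv_msb_mod (k : Nat) (x : Int) :
    pvMsb k (PySem.Int.mod x (10 ^ k)) = pvMsb k x := by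
  induction k generalizing x with
  | zero => rfl
  | succ k ih =>
    have hbpos : (0:Int) < 10 ^ k := by positivity
    have hBpos : (0:Int) < 10 ^ (k+1) := by positivity
    have hm : PySem.Int.mod x (10 ^ (k+1)) = x % (10 ^ (k+1)) :=
      PySem.Int.mod_eq_emod_of_pos hBpos
    -- low digit agrees
    have hlow : PySem.Int.mod (PySem.Int.mod x (10 ^ (k+1))) 10 = PySem.Int.mod x 10 := by
      rw [hm, PySem.Int.mod_eq_emod_of_pos (by norm_num : (0:Int) < 10),
          PySem.Int.mod_eq_emod_of_pos (by norm_num : (0:Int) < 10)]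
      exact Int.emod_emod_of_dvd x ⟨10 ^ k, by ring⟩
    -- shifted value: (x % 10^(k+1)) / 10 = (x / 10) % 10^k
    have hshift : PySem.Int.floordiv (PySem.Int.mod x (10 ^ (k+1))) 10
        = PySem.Int.mod (PySem.Int.floordiv x 10) (10 ^ k) := by
      rw [hm, PySem.Int.floordiv_eq_ediv_of_pos (by norm_num : (0:Int) < 10),
          PySem.Int.mod_eq_emod_of_pos hbpos,
          PySem.Int.floordiv_eq_ediv_of_pos (by norm_num : (0:Int) < 10)]
      set r := x % 10 ^ (k+1) with hrdef
      have hr0 : 0 ≤ r := Int.emod_nonneg x (by positivity)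
      have hr1 : r < 10 ^ (k+1) := Int.emod_lt_of_pos x hBpos
      have hx : x = 10 ^ (k+1) * (x / 10 ^ (k+1)) + r := (Int.mul_ediv_add_emod x _).symm
      have hdiv : x / 10 = r / 10 + 10 ^ k * (x / 10 ^ (k+1)) := by
        conv_lhs => rw [hx]
        rw [show (10:Int) ^ (k+1) * (x / 10 ^ (k+1)) + r
              = r + (10 ^ k * (x / 10 ^ (k+1))) * 10 by ring]
        rw [Int.add_mul_ediv_right _ _ (by norm_num)]
      rw [hdiv, Int.add_mul_emod_self_left]
      refine (Int.emod_eq_of_lt (Int.ediv_nonneg hr0 (by norm_num : (0:Int) ≤ 10)) ?_).symm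
      have h2 : ((10:Int) ^ (k+1) - 1) / 10 = 10 ^ k - 1 := by
        rw [show (10:Int) ^ (k+1) - 1 = -1 + 10 ^ k * 10 by ring,
            Int.add_mul_ediv_right _ _ (by norm_num : (10:Int) ≠ 0)]
        omega
      have h3 := Int.ediv_le_ediv (by norm_num : (0:Int) < 10) (by omega : r ≤ 10 ^ (k+1) - 1)
      omega
    rw [pvMsb, hlow, hshift, ih, pvMsb]

-- Nat.toDigits 10 is pvDigs
lemma pv_toDigitsCore_eq (f : Nat) : ∀ (n : Nat) (acc : List Char), n < f →
    Nat.toDigitsCore 10 f n acc = pvDigs n ++ acc := by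
  induction f with
  | zero => intro n acc h; omega
  | succ f ih =>
    intro n acc h
    rw [Nat.toDigitsCore]
    by_cases h10 : n < 10
    · have : n / 10 = 0 := Nat.div_eq_of_lt h10
      simp only [this]
      rw [pvDigs, if_pos h10, Nat.mod_eq_of_lt h10]
      rfl
    · have hne : ¬ n / 10 = 0 := by
        intro hc; exact h10 (by omega)
      simp only [hne, if_false]
      rw [ih (n / 10) _ (by
        have := Nat.div_lt_self (by omega : 0 < n) (by omega : 1 < 10)
        omega)]
      conv_rhs => rw [pvDigs.eq_def, if_neg h10]
      simp
lemma pv_toDigits_eq (n : Nat) : Nat.toDigits 10 n = pvDigs n :=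
  by simpa using pv_toDigitsCore_eq (n + 1) n [] (by omega)

lemma pv_digs_head (n : Nat) : ∃ d t, d < 10 ∧ pvDigs n = Nat.digitChar d :: t := by
  induction n using Nat.strong_induction_on with
  | _ n ih =>
    by_cases h : n < 10
    · exact ⟨n, [], h, by rw [pvDigs, if_pos h]⟩
    · obtain ⟨d, t, hd, ht⟩ := ih (n / 10) (Nat.div_lt_self (by omega) (by omega))
      exact ⟨d, t ++ [Nat.digitChar (n % 10)], hd, by rw [pvDigs, if_neg h, ht]; simp⟩

-- the positive case of the digit characterization
lemma pv_msb_pos (k n : Nat) (hpos : 0 < n) (hlt : n < 10 ^ k) :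
    pvMsb k (n : Int) = List.replicate (k - (pvDigs n).length) '0' ++ pvDigs n := by
  induction k generalizing n with
  | zero => omega
  | succ k ih =>
    have hmod : PySem.Int.mod (n : Int) 10 = ((n % 10 : Nat) : Int) := by
      exact_mod_cast PySem.Int.mod_natCast n 10
    have hdiv : PySem.Int.floordiv (n : Int) 10 = ((n / 10 : Nat) : Int) := by
      exact_mod_cast PySem.Int.floordiv_natCast n 10
    rw [pvMsb, hmod, hdiv]
    by_cases h10 : n < 10
    · have hq : n / 10 = 0 := Nat.div_eq_of_lt h10
      rw [hq, Nat.cast_zero, pv_msb_zero, pvDigs, if_pos h10, Nat.mod_eq_of_lt h10]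
      simp
    · have hqpos : 0 < n / 10 := Nat.div_pos (by omega) (by omega)
      have hqlt : n / 10 < 10 ^ k := by
        have h' : n < 10 * 10 ^ k := by rw [← pow_succ']; exact hlt
        exact Nat.div_lt_of_lt_mul h'
      rw [ih (n / 10) hqpos hqlt]
      conv_rhs => rw [pvDigs.eq_def, if_neg h10]
      have hlen : (pvDigs (n / 10) ++ [Nat.digitChar (n % 10)]).length
          = (pvDigs (n / 10)).length + 1 := by simp
      rw [hlen]
      have harith : k + 1 - ((pvDigs (n / 10)).length + 1) = k - (pvDigs (n / 10)).length := by
        omega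
      rw [harith]
      have hdc : (((n:Int)) % 10).toNat.digitChar = (n % 10).digitChar := by
        have ht' : (((n:Int)) % 10).toNat = n % 10 := by omega
        rw [ht']
      simp [List.append_assoc, hdc]

-- length of pvDigs n is at most k when n < 10^k (via msb)
lemma pv_digs_len (k n : Nat) (hpos : 0 < n) (hlt : n < 10 ^ k) :
    (pvDigs n).length ≤ k := by
  have h := congrArg List.length (pv_msb_pos k n hpos hlt)
  rw [pv_msb_length] at h
  simp at h
  omega

lemma pv_zfill_digs (k n : Nat) (hpos : 0 < n) (hlt : n < 10 ^ k) :
    PySem.Chars.zfill (pvDigs n) k = List.replicate (k - (pvDigs n).length) '0' ++ pvDigs n := by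
  have hlen := pv_digs_len k n hpos hlt
  obtain ⟨d, t, hd, ht⟩ := pv_digs_head n
  rw [PySem.Chars.zfill.eq_def]
  by_cases hcase : (k : Int) ≤ (pvDigs n).length
  · rw [if_pos hcase]
    have : k - (pvDigs n).length = 0 := by omega
    rw [this]
    simp
  · rw [if_neg hcase]
    rw [ht]
    have hsign : ¬ (Nat.digitChar d = '+' ∨ Nat.digitChar d = '-') := by
      interval_cases d <;> decide
    simp only [if_neg hsign]
    rw [← ht]
    simp

-- ===== VERDICT (by name: the statement is the Claim_ definition above) =====
theorem last_ten_digits_spec : Claim_equal_last_ten_digits := by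
  intro num _
  unfold Spec_last_ten_digits last_ten_digits last_ten_digits_alt
  -- rewrite A's fold into pvMsb
  have hrange : (PySem.List.pyRange 1 11 1).length = 10 := by decide
  have hA := pv_foldl_loop (PySem.List.pyRange 1 11 1) [] num
  rw [hrange] at hA
  simp only [show String.ofList ([]:List Char) = "" from rfl] at hA
  simp only [hA, List.nil_append]
  rw [PySem.Str.slice?_none_none_neg_one]
  simp only [Option.getD_some, String.toList_ofList, List.reverse_reverse]
  -- both sides are now about pvMsb 10 num / zfill of toStr (mod num 10^10)
  have hmnn : 0 ≤ PySem.Int.mod num (10 ^ 10) :=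
    PySem.Int.mod_nonneg num (by positivity : (0:Int) < 10 ^ 10)
  have hmlt : PySem.Int.mod num (10 ^ 10) < 10 ^ 10 :=
    PySem.Int.mod_lt num (by positivity : (0:Int) < 10 ^ 10)
  obtain ⟨n, hn⟩ : ∃ n : Nat, PySem.Int.mod num (10 ^ 10) = (n : Int) :=
    ⟨(PySem.Int.mod num (10 ^ 10)).toNat, (Int.toNat_of_nonneg hmnn).symm⟩
  rw [hn] at hmlt
  have hnlt : n < 10 ^ 10 := by exact_mod_cast hmlt
  rw [hn]
  -- B side: toStr n = digits string of n
  have htoChars : (PySem.Int.toStr (n : Int)).toList = Nat.toDigits 10 n := by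
    rw [PySem.Int.toList_toStr, PySem.Int.toChars, if_neg (by simp : ¬ ((n:Int) < 0))]
    simp
  have hBeq : PySem.Str.zfill (PySem.Int.toStr (n : Int)) 10
      = String.ofList (PySem.Chars.zfill (pvDigs n) 10) := by
    rw [PySem.Str.zfill, htoChars, pv_toDigits_eq]
  rw [hBeq]
  -- A side: pvMsb 10 num = pvMsb 10 n
  have hAeq : pvMsb 10 num = pvMsb 10 ((n : Nat) : Int) := by
    rw [← hn]
    exact (pv_msb_mod 10 num).symm
  rw [hAeq]
  by_cases hn0 : n = 0
  · subst hn0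
    rw [Nat.cast_zero, pv_msb_zero]
    have h1 : pvDigs 0 = ['0'] := by
      rw [pvDigs.eq_def]
      norm_num
      decide
    rw [h1]
    exact congrArg String.ofList (by decide)
  · have hz := pv_zfill_digs 10 n (by omega) hnlt
    rw [pv_msb_pos 10 n (by omega) hnlt]
    refine congrArg String.ofList ?_
    exact_mod_cast hz.symm
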